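/- GENERATED by farm/mkstatement.py from design/units.tsv (unit `digest_map.COMPOSITION`) and the Specs of Gif/Spec/*.lean — do not edit.
   THE STATEMENT of the proof unit `digest_map.COMPOSITION`: the function `digest_map` (67 instructions) satisfies its contract,
   GIVEN THE STATEMENTS OF ITS 3 SEGMENTS (`Gif.Spec.digest_map.Seg<k> Lay μ u₀`: what the unit `digest_map.<k>` proves).
   No machine code is walked: `ReachVia.trans` along the segments (the exit assertion of a segment is the entry assertion of
   its successor), an induction on the loop measures. What the names mean: ProgX/Base/Spec/Basic.lean. The theorem to prove:
   `theorem digest_map_COMPOSITION_ok : Gif.Spec.digest_map_COMPOSITION.Statement`. -/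
import Gif.Code
import Gif.Dec.All
import Gif.Labels
import Gif.Spec.Driver
import Gif.Spec.Seg_digest_map
namespace Gif.Spec.digest_map_COMPOSITION
open X86 X86.User Asan

/-- The statement of unit `digest_map.COMPOSITION`. -/
def Statement : Prop :=
  ∀ (Lay : Layout) (_hLay : Lay.hi = 0x1000000) (μ : Microarch) (_hμ : UserX.MicroOK μ) (u₀ : State)
    (_h_digest_map_1 : Gif.Spec.digest_map.Seg1 Lay μ u₀)
    (_h_digest_map_2 : Gif.Spec.digest_map.Seg2 Lay μ u₀)
    (_h_digest_map_E : Gif.Spec.digest_map.SegE Lay μ u₀),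
    ∀ (H : Heap) (rest : List Obj) (frames : List (Nat × FrameLayout)) (m : Option Map), Calls Lay μ ProgX.Base.WayInv (ProgX.Base.conv u₀) Gif.L.digest_map.entry (Gif.Spec.digest_map.spec H rest frames m)

end Gif.Spec.digest_map_COMPOSITION
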